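-- pv_equiv track=rewrite | github.com/jsp1440/orchid-continuum | orchid_authentication_detector.py | _check_impossible_color_combinations
-- ===== SOURCE A (Python) =====
-- from typing import Dict, List, Any, Optional, Tuple, Union
--
-- def _check_impossible_color_combinations(colors: List[str]) -> bool:
--     """Check for impossible or artificial color combinations"""
--     impossible_combinations = [
--         ['blue', 'neon'], ['fluorescent'], ['metallic'],
--         ['glow'], ['electric'], ['artificial']
--     ]
--
--     colors_lower = [c.lower() for c in colors]
--     for impossible in impossible_combinations:
--         if any(imp in ' '.join(colors_lower) for imp in impossible):
--             return True
--     return False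
-- ===== SOURCE B (Python) =====
-- def _check_impossible_color_combinations(colors):
--     """Check for impossible or artificial color combinations"""
--     keywords = ('blue', 'neon', 'fluorescent', 'metallic', 'glow', 'electric', 'artificial')
--     for color in colors:
--         c = color.lower()
--         if any(kw in c for kw in keywords):
--             return True
--     return False
-- ===== Notes on version B (the rewrite author's own statement) =====
-- stated objective: simpler
-- what changed: Flattens the nested keyword sublists into one flat tuple and tests each color's lowercase individually instead of building a joined string and scanning it once per keyword group; equivalent because no keyword contains a space.
import Mathlib
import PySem

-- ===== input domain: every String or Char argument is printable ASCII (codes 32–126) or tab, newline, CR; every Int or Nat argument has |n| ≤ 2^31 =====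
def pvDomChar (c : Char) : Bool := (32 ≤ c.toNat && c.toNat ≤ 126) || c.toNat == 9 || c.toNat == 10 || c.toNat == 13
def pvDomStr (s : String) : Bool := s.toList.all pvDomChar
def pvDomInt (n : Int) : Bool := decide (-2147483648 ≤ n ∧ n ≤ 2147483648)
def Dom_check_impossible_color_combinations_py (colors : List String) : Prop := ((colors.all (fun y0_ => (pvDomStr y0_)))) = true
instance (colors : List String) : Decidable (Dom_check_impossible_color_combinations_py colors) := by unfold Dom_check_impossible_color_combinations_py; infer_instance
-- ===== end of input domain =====

-- B replaces A's join-the-lowercased-list-then-substring scan over nested keyword sublists by a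
-- single flat keyword tuple tested per color (simpler; equivalent because no keyword contains a space).

-- ===== PORT A =====
def pvImpossibleCombinations : List (List String) :=
  [["blue","neon"],["fluorescent"],["metallic"],["glow"],["electric"],["artificial"]]

def pvALoop (colors_lower : List String) : List (List String) → Bool
  | [] => false
  | impossible :: rest =>
      if impossible.any (fun imp => PySem.Str.isIn imp (PySem.Str.join " " colors_lower)) then true
      else pvALoop colors_lower rest

def check_impossible_color_combinations_py (colors : List String) : Bool :=
  pvALoop (colors.map PySem.Str.lower) pvImpossibleCombinations

-- ===== PORT B =====
def pvKeywords : List String := ["blue","neon","fluorescent","metallic","glow","electric","artificial"]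

def check_impossible_color_combinations_py_alt (colors : List String) : Bool :=
  colors.any (fun color => pvKeywords.any (fun kw => PySem.Str.isIn kw (PySem.Str.lower color)))

-- ===== PRECONDITION & SPEC =====
def Spec_check_impossible_color_combinations_py (colors : List String) (out : Bool) : Prop := out = check_impossible_color_combinations_py_alt colors
instance (colors : List String) (out : Bool) : Decidable (Spec_check_impossible_color_combinations_py colors out) := by unfold Spec_check_impossible_color_combinations_py; infer_instance

-- ===== CLAIM (what is proved, stated in full; the proofs are below) =====
def Claim_equal_check_impossible_color_combinations_py : Prop := ∀ (colors : List String), Dom_check_impossible_color_combinations_py colors → Spec_check_impossible_color_combinations_py colors (check_impossible_color_combinations_py colors)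

-- ===== LEMMAS AND PROOFS =====
theorem infix_append_cons_split {α : Type} (c : α) (l a b : List α) (hc : c ∉ l)
    (hi : l <:+: a ++ c :: b) : l <:+: a ∨ l <:+: b := by
  obtain ⟨s, t, he⟩ := hi
  rw [List.append_assoc] at he
  by_cases h1 : s.length + l.length ≤ a.length
  · left
    refine ⟨s, t.take (a.length - s.length - l.length), ?_⟩
    have ha : a = (s ++ (l ++ t)).take a.length := by rw [he]; simp
    rw [ha, List.take_append, List.take_append,
        List.take_of_length_le (show s.length ≤ a.length by omega),
        List.take_of_length_le (show l.length ≤ a.length - s.length by omega)]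
    simp [List.append_assoc]
  · by_cases h2 : a.length + 1 ≤ s.length
    · right
      refine ⟨s.drop (a.length + 1), t, ?_⟩
      have hb : b = (s ++ (l ++ t)).drop (a.length + 1) := by rw [he]; simp
      rw [hb, List.drop_append, List.drop_append,
          show a.length + 1 - s.length = 0 by omega]
      simp
    · exfalso
      have hget : (s ++ (l ++ t))[a.length]? = some c := by rw [he]; simp
      have : (s ++ (l ++ t))[a.length]? = l[a.length - s.length]? := by
        rw [List.getElem?_append_right (by omega),
            List.getElem?_append_left (by omega)]
      rw [this] at hget
      exact hc (List.mem_of_getElem? hget)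

theorem infix_join_space (sub : List Char) (hne : sub ≠ []) (hsp : ' ' ∉ sub) :
    ∀ parts : List (List Char),
      (sub <:+: PySem.Chars.join [' '] parts ↔ ∃ p ∈ parts, sub <:+: p)
  | [] => by
    simp [PySem.Chars.join_nil, List.infix_nil, hne]
  | [p] => by
    simp [PySem.Chars.join_singleton]
  | p :: q :: rest => by
    rw [PySem.Chars.join_cons_cons, List.append_assoc]
    have hJ : ([' '] : List Char) ++ PySem.Chars.join [' '] (q :: rest) =
        ' ' :: PySem.Chars.join [' '] (q :: rest) := rfl
    rw [hJ]
    constructor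
    · intro h
      rcases infix_append_cons_split ' ' sub p _ hsp h with h' | h'
      · exact ⟨p, List.mem_cons_self, h'⟩
      · obtain ⟨r, hr, hr'⟩ := (infix_join_space sub hne hsp (q :: rest)).mp h'
        exact ⟨r, List.mem_cons_of_mem p hr, hr'⟩
    · rintro ⟨r, hr, hr'⟩
      rcases List.mem_cons.mp hr with rfl | hr
      · exact hr'.trans ⟨[], ' ' :: PySem.Chars.join [' '] (q :: rest), by simp⟩
      · have := (infix_join_space sub hne hsp (q :: rest)).mpr ⟨r, hr, hr'⟩
        exact this.trans ⟨p ++ [' '], [], by simp⟩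

theorem isIn_join_lower (kw : String) (hne : kw.toList ≠ []) (hsp : ' ' ∉ kw.toList)
    (colors : List String) :
    PySem.Str.isIn kw (PySem.Str.join " " (colors.map PySem.Str.lower)) =
    colors.any (fun c => PySem.Str.isIn kw (PySem.Str.lower c)) := by
  rw [Bool.eq_iff_iff]
  simp only [PySem.Str.isIn_eq, PySem.Str.toList_join, List.map_map, List.any_eq_true,
    PySem.Chars.isIn_iff_infix]
  have : (" ".toList : List Char) = [' '] := rfl
  rw [this, infix_join_space kw.toList hne hsp]
  constructor
  · rintro ⟨p, hp, hp'⟩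
    obtain ⟨c, hc, rfl⟩ := List.mem_map.mp hp
    exact ⟨c, hc, by simpa using hp'⟩
  · rintro ⟨c, hc, hc'⟩
    exact ⟨(PySem.Str.lower c).toList, List.mem_map.mpr ⟨c, hc, rfl⟩, by simpa using hc'⟩


theorem any_or_split {al : Type} (xs : List al) (f g : al → Bool) :
    xs.any (fun x => f x || g x) = (xs.any f || xs.any g) := by
  induction xs with
  | nil => rfl
  | cons x xs ih =>
    simp only [List.any_cons, ih]
    cases f x <;> cases g x <;> simp

theorem any_swap {al be : Type} (xs : List al) (ys : List be) (p : al → be → Bool) :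
    xs.any (fun x => ys.any (p x)) = ys.any (fun y => xs.any (fun x => p x y)) := by
  induction xs with
  | nil => simp
  | cons x xs ih =>
    simp only [List.any_cons, ih]
    rw [← any_or_split]

theorem any_congr_mem {al : Type} (xs : List al) (f g : al → Bool)
    (h : ∀ x ∈ xs, f x = g x) : xs.any f = xs.any g := by
  induction xs with
  | nil => rfl
  | cons x xs ih =>
    simp only [List.any_cons, h x List.mem_cons_self,
      ih (fun y hy => h y (List.mem_cons_of_mem x hy))]

theorem pvALoop_eq (cl : List String) (gs : List (List String)) :
    pvALoop cl gs = gs.flatten.any (fun imp => PySem.Str.isIn imp (PySem.Str.join " " cl)) := by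
  induction gs with
  | nil => rfl
  | cons g rest ih =>
    simp only [pvALoop, ih, List.flatten_cons, List.any_append]
    cases g.any (fun imp => PySem.Str.isIn imp (PySem.Str.join " " cl)) <;> simp


-- ===== VERDICT (by name: the statement is the Claim_ definition above) =====
theorem check_impossible_color_combinations_py_spec : Claim_equal_check_impossible_color_combinations_py := by
  intro colors _
  unfold Spec_check_impossible_color_combinations_py
  unfold check_impossible_color_combinations_py check_impossible_color_combinations_py_alt
  rw [pvALoop_eq, show pvImpossibleCombinations.flatten = pvKeywords from rfl,
      any_swap colors pvKeywords]
  apply (any_congr_mem pvKeywords _ _ _).symm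
  intro kw hkw
  rw [isIn_join_lower kw ?_ ?_ colors] <;> fin_cases hkw <;> decide
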